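-- pv_equiv track=rewrite | github.com/riku-k061/CityInfraXLS | query_assets.py | find_date_column
-- ===== SOURCE A (Python) =====
-- def find_date_column(asset_type, schema):
--     """Determine which column contains date information for this asset type"""
--     date_keywords = ['Date', 'Installed', 'Built', 'Maintenance', 'Inspection']
--
--     # Get the fields for this asset type
--     fields = schema.get(asset_type, [])
--
--     # Look for field names that contain date-related keywords
--     for field in fields:
--         for keyword in date_keywords:
--             if keyword.lower() in field.lower():
--                 return field
--
--     # Default to 'Installation Date' if available, otherwise None
--     return 'Installation Date' if 'Installation Date' in fields else None
-- ===== SOURCE B (Python) =====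
-- DATE_KEYWORDS_LOWER = ['date', 'installed', 'built', 'maintenance', 'inspection']
--
-- def find_date_column(asset_type, schema):
--     """Determine which column contains date information for this asset type"""
--     # First field containing a date keyword (case-insensitive); the 'Installation Date'
--     # fallback of the original is unreachable (it would itself match 'date'), so None.
--     return next(
--         (field for field in schema.get(asset_type, [])
--          if any(kw in field.lower() for kw in DATE_KEYWORDS_LOWER)),
--         None)
-- ===== Notes on version B (the rewrite author's own statement) =====
-- stated objective: idiomatic
-- what changed: Replaces the nested keyword loop plus the unreachable 'Installation Date' fallback with a single next()/any() generator over pre-lowered keywords, returning None directly (the fallback field would always have matched the 'date' keyword).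
import Mathlib
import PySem

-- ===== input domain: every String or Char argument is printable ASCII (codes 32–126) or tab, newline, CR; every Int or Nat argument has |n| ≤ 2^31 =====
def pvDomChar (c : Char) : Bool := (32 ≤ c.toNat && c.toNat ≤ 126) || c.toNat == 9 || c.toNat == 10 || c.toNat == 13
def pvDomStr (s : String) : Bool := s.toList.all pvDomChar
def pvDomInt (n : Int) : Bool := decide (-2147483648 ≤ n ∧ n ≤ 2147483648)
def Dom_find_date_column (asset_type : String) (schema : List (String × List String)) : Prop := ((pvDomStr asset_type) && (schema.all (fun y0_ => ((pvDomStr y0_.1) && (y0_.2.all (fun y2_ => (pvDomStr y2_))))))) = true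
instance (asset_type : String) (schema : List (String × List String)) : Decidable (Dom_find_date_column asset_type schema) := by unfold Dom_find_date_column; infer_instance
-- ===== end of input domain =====

-- B replaces A's nested keyword loop and unreachable 'Installation Date' fallback with a
-- single first-match scan over pre-lowered keywords (idiomatic; same behaviour, proved below).


-- ===== PORT A =====
def date_keywords : List String := ["Date", "Installed", "Built", "Maintenance", "Inspection"]

-- inner 'for keyword in date_keywords: if keyword.lower() in field.lower(): return field'
def aInner (field : String) : List String → Option String
  | [] => none
  | k :: ks =>
    if PySem.Str.isIn (PySem.Str.lower k) (PySem.Str.lower field) then some field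
    else aInner field ks

-- outer 'for field in fields: …'
def aOuter : List String → Option String
  | [] => none
  | f :: fs =>
    match aInner f date_keywords with
    | some r => some r
    | none => aOuter fs

def find_date_column (asset_type : String) (schema : List (String × List String)) : Option String :=
  let fields := PySem.Dict.getD (PySem.Dict.mk schema) asset_type []
  match aOuter fields with
  | some r => some r
  | none => if fields.contains "Installation Date" then some "Installation Date" else none

-- ===== PORT B =====
def date_keywords_lower : List String := ["date", "installed", "built", "maintenance", "inspection"]

def bPred (field : String) : Bool :=
  date_keywords_lower.any (fun kw => PySem.Str.isIn kw (PySem.Str.lower field))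

def find_date_column_alt (asset_type : String) (schema : List (String × List String)) : Option String :=
  (PySem.Dict.getD (PySem.Dict.mk schema) asset_type []).find? bPred

-- ===== PRECONDITION & SPEC =====
def Spec_find_date_column (asset_type : String) (schema : List (String × List String)) (out : Option String) : Prop := out = find_date_column_alt asset_type schema
instance (asset_type : String) (schema : List (String × List String)) (out : Option String) : Decidable (Spec_find_date_column asset_type schema out) := by unfold Spec_find_date_column; infer_instance

-- ===== CLAIM (what is proved, stated in full; the proofs are below) =====
def Claim_equal_find_date_column : Prop := ∀ (asset_type : String) (schema : List (String × List String)), Dom_find_date_column asset_type schema → Spec_find_date_column asset_type schema (find_date_column asset_type schema)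

-- ===== LEMMAS AND PROOFS =====

-- A's inner keyword loop succeeds (returning the field) exactly when B's predicate holds
theorem aInner_eq_if (f : String) :
    aInner f date_keywords = if bPred f then some f else none := by
  have h1 : PySem.Str.lower "Date" = "date" := by decide
  have h2 : PySem.Str.lower "Installed" = "installed" := by decide
  have h3 : PySem.Str.lower "Built" = "built" := by decide
  have h4 : PySem.Str.lower "Maintenance" = "maintenance" := by decide
  have h5 : PySem.Str.lower "Inspection" = "inspection" := by decide
  simp only [aInner, date_keywords, bPred, date_keywords_lower, List.any, h1, h2, h3, h4, h5]
  split_ifs <;> simp_all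

-- A's outer loop is B's first-match scan
theorem aOuter_eq_find? (fields : List String) :
    aOuter fields = fields.find? bPred := by
  induction fields with
  | nil => rfl
  | cons f fs ih =>
    simp only [aOuter, aInner_eq_if, List.find?]
    by_cases h : bPred f <;> simp [h, ih]

-- the fallback field always satisfies B's predicate
theorem bPred_installation_date : bPred "Installation Date" = true := by decide

-- ===== VERDICT (by name: the statement is the Claim_ definition above) =====
theorem find_date_column_spec : Claim_equal_find_date_column := by
  intro asset_type schema _
  unfold Spec_find_date_column find_date_column find_date_column_alt
  simp only [aOuter_eq_find?]
  cases hf : (PySem.Dict.getD (PySem.Dict.mk schema) asset_type []).find? bPred with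
  | some r => simp
  | none =>
    have hno := List.find?_eq_none.mp hf
    have hmem : "Installation Date" ∉ PySem.Dict.getD (PySem.Dict.mk schema) asset_type [] := fun hc =>
      absurd bPred_installation_date (by simpa using hno _ hc)
    simp [hmem]
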